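-- pv_equiv track=rewrite | github.com/maevalesaffre/university_project | l1_infomatique/deuxième semestre/ap1/entrainement ds1.py | nombre_medailles
-- ===== SOURCE A (Python) =====
-- def nombre_medailles(tableau,pays):
--     gold=0
--     silver=0
--     bronze=0
--     liste_pays=tableau[pays]
--     for i in range(len(liste_pays)):
--         if liste_pays[i][1]=="GOLD":
--             gold=gold+1
--         elif liste_pays[i][1]=="SILVER":
--             silver=silver+1
--         elif liste_pays[i][1]=="BRONZE":
--             bronze=bronze+1
--     return (gold,silver,bronze)
-- ===== SOURCE B (Python) =====
-- def nombre_medailles(tableau, pays):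
--     liste_pays = tableau[pays]
--     gold = sum(1 for x in liste_pays if x[1] == "GOLD")
--     silver = sum(1 for x in liste_pays if x[1] == "SILVER")
--     bronze = sum(1 for x in liste_pays if x[1] == "BRONZE")
--     return (gold, silver, bronze)
-- ===== Notes on version B (the rewrite author's own statement) =====
-- stated objective: simpler
-- what changed: Replaces the single index loop with mutable if/elif counters by three independent one-medal counting passes (sum over a filter per medal colour), returning the triple directly.
-- outside the precondition, e.g. on nombre_medailles({}, 'FR'): A raises KeyError, B raises KeyError
import Mathlib
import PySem

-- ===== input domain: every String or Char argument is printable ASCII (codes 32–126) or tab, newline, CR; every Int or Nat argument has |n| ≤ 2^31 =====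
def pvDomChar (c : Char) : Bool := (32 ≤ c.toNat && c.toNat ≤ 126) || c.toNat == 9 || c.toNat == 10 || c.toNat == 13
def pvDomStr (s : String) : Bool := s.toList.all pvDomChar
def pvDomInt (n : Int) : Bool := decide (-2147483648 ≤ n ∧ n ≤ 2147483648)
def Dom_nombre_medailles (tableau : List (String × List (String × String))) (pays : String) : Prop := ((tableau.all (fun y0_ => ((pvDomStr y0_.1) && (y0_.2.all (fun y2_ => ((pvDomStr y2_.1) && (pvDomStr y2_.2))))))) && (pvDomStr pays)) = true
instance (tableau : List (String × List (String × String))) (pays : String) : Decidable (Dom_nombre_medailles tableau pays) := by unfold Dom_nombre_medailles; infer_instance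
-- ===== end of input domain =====

-- B replaces A's single branching index loop by three independent one-medal counting passes (simpler decomposition, same cost).
-- ===== PORT A =====
-- tableau[pays]: first-match association-list lookup; Pre_ excludes the KeyError case, outside it .getD [] is unreachable.
def pvLookupA (tableau : List (String × List (String × String))) (pays : String) : List (String × String) :=
  ((tableau.find? (fun kv => kv.1 == pays)).map Prod.snd).getD []

-- the body of A's loop: the if/elif chain updating (gold, silver, bronze)
def pvStepA (st : Int × Int × Int) (x : String × String) : Int × Int × Int :=
  if x.2 == "GOLD" then (st.1 + 1, st.2.1, st.2.2)
  else if x.2 == "SILVER" then (st.1, st.2.1 + 1, st.2.2)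
  else if x.2 == "BRONZE" then (st.1, st.2.1, st.2.2 + 1)
  else st

def nombre_medailles (tableau : List (String × List (String × String))) (pays : String) : Int × Int × Int :=
  let liste_pays := pvLookupA tableau pays
  -- for i in range(len(liste_pays)): visits the elements in order
  liste_pays.foldl pvStepA (0, 0, 0)

-- ===== PORT B =====
def nombre_medailles_alt (tableau : List (String × List (String × String))) (pays : String) : Int × Int × Int :=
  let liste_pays := ((tableau.find? (fun kv => kv.1 == pays)).map Prod.snd).getD []
  ((liste_pays.countP (fun x => x.2 == "GOLD") : Int),
   (liste_pays.countP (fun x => x.2 == "SILVER") : Int),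
   (liste_pays.countP (fun x => x.2 == "BRONZE") : Int))

-- Pre_ excludes exactly the inputs where pays is not a key of tableau (Python raises KeyError there).
def Pre_nombre_medailles (tableau : List (String × List (String × String))) (pays : String) : Prop :=
  tableau.any (fun kv => kv.1 == pays) = true
instance (tableau : List (String × List (String × String))) (pays : String) : Decidable (Pre_nombre_medailles tableau pays) := by unfold Pre_nombre_medailles; infer_instance
def pvWitness_nombre_medailles : (List (String × List (String × String))) × String :=
  ([("FR", [("x", "GOLD"), ("y", "BRONZE")])], "FR")

-- ===== PRECONDITION & SPEC =====
def Spec_nombre_medailles (tableau : List (String × List (String × String))) (pays : String) (out : Int × Int × Int) : Prop := out = nombre_medailles_alt tableau pays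
instance (tableau : List (String × List (String × String))) (pays : String) (out : Int × Int × Int) : Decidable (Spec_nombre_medailles tableau pays out) := by unfold Spec_nombre_medailles; infer_instance

-- ===== CLAIM (what is proved, stated in full; the proofs are below) =====
def Claim_equal_nombre_medailles : Prop := ∀ (tableau : List (String × List (String × String))) (pays : String), Dom_nombre_medailles tableau pays → Pre_nombre_medailles tableau pays → Spec_nombre_medailles tableau pays (nombre_medailles tableau pays)

-- ===== LEMMAS AND PROOFS =====

-- ===== VERDICT (by name: the statement is the Claim_ definition above) =====
lemma medal_fold_count (l : List (String × String)) (g s b : Int) :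
    l.foldl pvStepA (g, s, b)
    = (g + (l.countP (fun x => x.2 == "GOLD") : Int),
       s + (l.countP (fun x => x.2 == "SILVER") : Int),
       b + (l.countP (fun x => x.2 == "BRONZE") : Int)) := by
  induction l generalizing g s b with
  | nil => simp
  | cons hd tl ih =>
    simp only [List.foldl_cons, List.countP_cons]
    by_cases h1 : hd.2 == "GOLD" <;> by_cases h2 : hd.2 == "SILVER" <;>
      by_cases h3 : hd.2 == "BRONZE" <;>
      simp [pvStepA, h1, h2, h3, ih, Prod.ext_iff] <;> push_cast <;> first | omega | simp_all

theorem nombre_medailles_spec : Claim_equal_nombre_medailles := by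
  intro tableau pays _ _
  unfold Spec_nombre_medailles
  simp [nombre_medailles, nombre_medailles_alt, pvLookupA, medal_fold_count]
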